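-- pv_equiv track=rewrite | github.com/roa5108/Bookmate | book_recommendation_chatbot.py | filter_books
-- ===== SOURCE A (Python) =====
-- def filter_books(books, keywords):
--     scored_books = []
--     for book in books:
--         relevance_score = sum(kw.lower() in book['title'].lower() or kw.lower() in book['description'].lower() for kw in keywords)
--         if relevance_score > 0:
--             scored_books.append((book, relevance_score))
--     scored_books.sort(key=lambda x: x[1], reverse=True)
--     return [book for book, score in scored_books]
-- ===== SOURCE B (Python) =====
-- def filter_books(books, keywords):
--     lowered = [kw.lower() for kw in keywords]
--     buckets = {}
--     for book in books:
--         title = book['title'].lower()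
--         desc = book['description'].lower()
--         score = sum(1 for kw in lowered if kw in title or kw in desc)
--         if score > 0:
--             buckets.setdefault(score, []).append(book)
--     result = []
--     for s in range(len(keywords), 0, -1):
--         result.extend(buckets.get(s, []))
--     return result
-- ===== Notes on version B (the rewrite author's own statement) =====
-- stated objective: alternative
-- what changed: B lowercases the keywords once, groups matching books into per-score buckets (a dict score -> list, insertion order preserved) and emits buckets from score len(keywords) down to 1, replacing A's collect-pairs-then-stable-reverse-sort with a counting/bucket sort.
-- outside the precondition, e.g. on filter_books([{}], []): A returns [], B raises KeyError; on filter_books([{'title': 'x'}], ['x']): A returns [{'title': 'x'}], B raises KeyError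
import Mathlib
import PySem

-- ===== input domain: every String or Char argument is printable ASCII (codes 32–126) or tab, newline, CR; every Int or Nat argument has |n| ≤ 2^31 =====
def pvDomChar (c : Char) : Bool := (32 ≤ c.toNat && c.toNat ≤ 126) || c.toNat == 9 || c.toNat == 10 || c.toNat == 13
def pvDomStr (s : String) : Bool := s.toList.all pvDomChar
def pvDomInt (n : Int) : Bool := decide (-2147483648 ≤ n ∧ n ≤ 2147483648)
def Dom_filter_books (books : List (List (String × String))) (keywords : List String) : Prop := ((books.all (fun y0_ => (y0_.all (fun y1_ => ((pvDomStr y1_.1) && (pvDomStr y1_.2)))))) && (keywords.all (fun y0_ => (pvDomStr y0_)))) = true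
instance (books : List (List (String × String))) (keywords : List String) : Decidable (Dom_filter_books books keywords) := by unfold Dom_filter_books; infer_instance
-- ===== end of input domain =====

-- B replaces A's collect-(book,score)-pairs-then-stable-reverse-sort with a counting/bucket
-- sort: per-score buckets filled in input order, emitted from the highest score down to 1.

-- ===== PORT A =====
-- book['title'] / book['description'] are ported as first-match association-list lookup with
-- default "" — Pre_filter_books guarantees both keys exist, so the default is never used inside Pre_.
def pvGetKey (book : List (String × String)) (k : String) : String :=
  (PySem.Dict.mk book).getD k ""

def pvScoreA (keywords : List String) (book : List (String × String)) : Int :=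
  (keywords.map (fun kw =>
    if PySem.Str.isIn (PySem.Str.lower kw) (PySem.Str.lower (pvGetKey book "title"))
       || PySem.Str.isIn (PySem.Str.lower kw) (PySem.Str.lower (pvGetKey book "description"))
    then (1 : Int) else 0)).sum

def filter_books (books : List (List (String × String))) (keywords : List String) : List (List (String × String)) :=
  let scored_books := books.foldl (fun acc book =>
      let relevance_score := pvScoreA keywords book
      if relevance_score > 0 then acc ++ [(book, relevance_score)] else acc) []
  (PySem.List.sorted scored_books (fun x => x.2) true).map (fun x => x.1)

-- ===== PORT B =====
def pvScoreB (lowered : List String) (book : List (String × String)) : Int :=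
  let title := PySem.Str.lower (pvGetKey book "title")
  let desc := PySem.Str.lower (pvGetKey book "description")
  ((lowered.filter (fun kw => PySem.Str.isIn kw title || PySem.Str.isIn kw desc)).map
    (fun _ => (1 : Int))).sum

def filter_books_alt (books : List (List (String × String))) (keywords : List String) : List (List (String × String)) :=
  let lowered := keywords.map PySem.Str.lower
  let buckets := books.foldl (fun d book =>
      let score := pvScoreB lowered book
      if score > 0 then d.insert score ((d.getD score []) ++ [book]) else d)
    (PySem.Dict.empty : PySem.Dict Int (List (List (String × String))))
  (PySem.List.pyRange (keywords.length : Int) 0 (-1)).foldl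
    (fun res s => res ++ buckets.getD s []) []

-- ===== PRECONDITION & SPEC =====
-- Pre_ excludes books missing a 'title' or 'description' key: there Python A usually raises KeyError,
-- but can accidentally return (empty keywords never run the generator; the or-short-circuit can skip a
-- missing 'description'); B reads both keys up front and raises KeyError on all such books.
def Pre_filter_books (books : List (List (String × String))) (_keywords : List String) : Prop :=
  ∀ book ∈ books, (book.any (fun p => p.1 == "title")) = true ∧ (book.any (fun p => p.1 == "description")) = true
instance (books : List (List (String × String))) (keywords : List String) : Decidable (Pre_filter_books books keywords) := by unfold Pre_filter_books; infer_instance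

def pvWitness_filter_books : (List (List (String × String))) × List String :=
  ([[("title", "Dune"), ("description", "sand planet")], [("title", "Emma"), ("description", "a novel")]], ["dune", "novel"])

def Spec_filter_books (books : List (List (String × String))) (keywords : List String) (out : List (List (String × String))) : Prop := out = filter_books_alt books keywords
instance (books : List (List (String × String))) (keywords : List String) (out : List (List (String × String))) : Decidable (Spec_filter_books books keywords out) := by unfold Spec_filter_books; infer_instance

-- ===== CLAIM (what is proved, stated in full; the proofs are below) =====
def Claim_equal_filter_books : Prop := ∀ (books : List (List (String × String))) (keywords : List String), Dom_filter_books books keywords → Pre_filter_books books keywords → Spec_filter_books books keywords (filter_books books keywords)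

-- ===== LEMMAS AND PROOFS =====

-- the descending score list [k, k-1, …, 1]
def pvDesc : Nat → List Int
  | 0 => []
  | k + 1 => ((k : Int) + 1) :: pvDesc k

theorem pvMem_desc {s : Int} : ∀ {k : Nat}, s ∈ pvDesc k → 1 ≤ s ∧ s ≤ (k : Int) := by
  intro k
  induction k with
  | zero => simp [pvDesc]
  | succ n ih =>
    intro h
    rcases List.mem_cons.mp h with h | h
    · subst h; omega
    · have := ih h; push_cast; omega

theorem pvRange_map_desc : ∀ (k : Nat), (List.range k).map (fun (j : Nat) => (k : Int) - (j : Int)) = pvDesc k := by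
  intro k
  induction k with
  | zero => simp [pvDesc]
  | succ n ih =>
    rw [List.range_succ_eq_map]
    simp only [List.map_cons, List.map_map, pvDesc]
    congr 1
    rw [← ih]; apply List.map_congr_left; intro j hj
    simp only [Function.comp_apply]; push_cast; ring

theorem pvPyRange_desc (k : Nat) : PySem.List.pyRange (k : Int) 0 (-1) = pvDesc k := by
  rw [← pvRange_map_desc k]
  simp only [PySem.List.pyRange]
  norm_num
  by_cases h : 0 < k
  · rw [if_pos h]
    apply List.map_congr_left; intro j hj; ring
  · have hk : k = 0 := by omega
    subst hk; simp

-- B's per-book score equals A's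
theorem pvScore_eq (keywords : List String) (book : List (String × String)) :
    pvScoreB (keywords.map PySem.Str.lower) book = pvScoreA keywords book := by
  simp only [pvScoreA, pvScoreB]
  induction keywords with
  | nil => rfl
  | cons kw tl ih =>
    simp only [List.map_cons, List.filter_cons, List.sum_cons]
    cases h : (PySem.Str.isIn (PySem.Str.lower kw) (PySem.Str.lower (pvGetKey book "title"))
       || PySem.Str.isIn (PySem.Str.lower kw) (PySem.Str.lower (pvGetKey book "description"))) with
    | false => simp only [Bool.false_eq_true, if_false]; omega
    | true => simp only [if_true, List.map_cons, List.sum_cons]; omega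

theorem pvScoreA_le (keywords : List String) (book : List (String × String)) :
    pvScoreA keywords book ≤ (keywords.length : Int) := by
  simp only [pvScoreA]
  induction keywords with
  | nil => simp
  | cons kw tl ih => simp only [List.map_cons, List.sum_cons, List.length_cons]; push_cast; split <;> omega

-- stable insertion of x into a list that is a block of keys ≥ x's followed by a block of smaller keys
theorem pvInsertBy_append {α : Type} (before : α → α → Bool) (x : α) (A B : List α)
    (hA : ∀ a ∈ A, before x a = false) (hB : ∀ b ∈ B, before x b = true) :
    PySem.List.insertBy before x (A ++ B) = A ++ x :: B := by
  induction A with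
  | nil =>
    cases B with
    | nil => rfl
    | cons b B' =>
      simp only [List.nil_append, PySem.List.insertBy]
      rw [if_pos (hB b (List.mem_cons_self))]
  | cons a A' ih =>
    simp only [List.cons_append, PySem.List.insertBy]
    rw [if_neg (by simp [hA a List.mem_cons_self])]
    rw [ih (fun a' ha' => hA a' (List.mem_cons_of_mem _ ha'))]

-- pvDesc k splits at any score m in [1,k] into strictly-bigger scores, m, and pvDesc (m-1)
theorem pvDesc_split (m k : Nat) (hm : 1 ≤ m) (h : m ≤ k) :
    ∃ hi : List Int, pvDesc k = hi ++ (m : Int) :: pvDesc (m - 1) ∧ ∀ s ∈ hi, (m : Int) < s := by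
  induction k with
  | zero => omega
  | succ n ih =>
    by_cases hmk : m = n + 1
    · refine ⟨[], ?_, by simp⟩
      subst hmk
      simp only [pvDesc, List.nil_append, Nat.add_sub_cancel]
      congr 1
    · obtain ⟨hi, h1, h2⟩ := ih (by omega)
      refine ⟨((n : Int) + 1) :: hi, ?_, ?_⟩
      · simp [pvDesc, h1]
      · intro s hs
        rcases List.mem_cons.mp hs with hs | hs
        · subst hs; omega
        · exact h2 s hs

-- the stable descending sort by score is the concatenation of the score buckets, top score first
theorem pvSorted_buckets {β : Type} (k : Nat) (L : List (β × Int))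
    (hL : ∀ x ∈ L, 1 ≤ x.2 ∧ x.2 ≤ (k : Int)) :
    PySem.List.sorted L (fun x => x.2) true
      = (pvDesc k).flatMap (fun s => L.filter (fun x => x.2 == s)) := by
  rw [PySem.List.sorted_rev_eq_foldl_insertBy]
  induction L using List.reverseRecOn with
  | nil => simp
  | append_singleton L x ih =>
    rw [List.foldl_append, List.foldl_cons, List.foldl_nil]
    rw [ih (fun y hy => hL y (List.mem_append_left _ hy))]
    obtain ⟨hx1, hx2⟩ := hL x (List.mem_append_right _ (List.mem_cons_self))
    obtain ⟨m, hmx, hm1, hmk⟩ : ∃ m : Nat, (m : Int) = x.2 ∧ 1 ≤ m ∧ m ≤ k :=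
      ⟨x.2.toNat, by omega, by omega, by omega⟩
    obtain ⟨hi, hsplit, hhi⟩ := pvDesc_split m k hm1 hmk
    have hcast : ((m - 1 : Nat) : Int) = (m : Int) - 1 := by omega
    have hbig : ∀ s ∈ hi, (L ++ [x]).filter (fun y => y.2 == s) = L.filter (fun y => y.2 == s) := by
      intro s hs
      have hne : x.2 ≠ s := by have := hhi s hs; omega
      rw [List.filter_append]
      simp [hne]
    have hlo : ∀ s ∈ pvDesc (m - 1), (L ++ [x]).filter (fun y => y.2 == s) = L.filter (fun y => y.2 == s) := by
      intro s hs
      have hb := pvMem_desc hs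
      have hne : x.2 ≠ s := by omega
      rw [List.filter_append]
      simp [hne]
    have hself : (L ++ [x]).filter (fun y => y.2 == (m : Int)) = L.filter (fun y => y.2 == (m : Int)) ++ [x] := by
      rw [List.filter_append]
      have : (x.2 == (m : Int)) = true := by simp only [beq_iff_eq]; omega
      simp [this]
    have hins := pvInsertBy_append (fun a b => decide (b.2 < a.2)) x
      (hi.flatMap (fun s => L.filter (fun y => y.2 == s)) ++ L.filter (fun y => y.2 == (m : Int)))
      ((pvDesc (m - 1)).flatMap (fun s => L.filter (fun y => y.2 == s)))
      (by
        intro a ha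
        rcases List.mem_append.mp ha with ha | ha
        · obtain ⟨s, hs, ha'⟩ := List.mem_flatMap.mp ha
          have h1 := hhi s hs
          have h2 := (List.mem_filter.mp ha').2
          simp only [beq_iff_eq] at h2
          simp only [decide_eq_false_iff_not]; omega
        · have h2 := (List.mem_filter.mp ha).2
          simp only [beq_iff_eq] at h2
          simp only [decide_eq_false_iff_not]; omega)
      (by
        intro b hb
        obtain ⟨s, hs, hb'⟩ := List.mem_flatMap.mp hb
        have h1 := pvMem_desc hs
        have h2 := (List.mem_filter.mp hb').2
        simp only [beq_iff_eq] at h2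
        simp only [decide_eq_true_eq]; omega)
    rw [hsplit]
    simp only [List.flatMap_append, List.flatMap_cons]
    rw [List.flatMap_congr hbig, List.flatMap_congr hlo, hself]
    rw [← List.append_assoc, hins]
    simp [List.append_assoc]

-- the bucket dict built by B's loop holds, at each positive score, the matching books in order
theorem pvBuckets_getD {β : Type} (score : β → Int) (books : List β) (s : Int) (hs : 1 ≤ s) :
    (books.foldl (fun d book =>
        if score book > 0 then d.insert (score book) ((d.getD (score book) []) ++ [book]) else d)
      (PySem.Dict.empty : PySem.Dict Int (List β))).getD s []
    = books.filter (fun b => score b == s) := by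
  induction books using List.reverseRecOn with
  | nil => rfl
  | append_singleton L b ih =>
    rw [List.foldl_append, List.foldl_cons, List.foldl_nil, List.filter_append]
    by_cases h : score b > 0
    · rw [if_pos h]
      by_cases he : s = score b
      · subst he
        rw [PySem.Dict.getD_insert, if_pos rfl, ih]
        simp
      · rw [PySem.Dict.getD_insert, if_neg he, ih]
        have : (score b == s) = false := by simp; omega
        simp [this]
    · rw [if_neg h]
      rw [ih]
      have : (score b == s) = false := by simp; omega
      simp [this]

theorem filter_books_eq (books : List (List (String × String))) (keywords : List String) :
    filter_books books keywords = filter_books_alt books keywords := by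
  simp only [filter_books, filter_books_alt]
  -- A's scored list in closed form
  have hsc : books.foldl (fun acc book =>
      let relevance_score := pvScoreA keywords book
      if relevance_score > 0 then acc ++ [(book, relevance_score)] else acc) []
      = (books.filter (fun b => decide (pvScoreA keywords b > 0))).map
          (fun b => (b, pvScoreA keywords b)) := by
    have h := PySem.List.foldl_append_if (fun b => decide (pvScoreA keywords b > 0))
      (fun b => (b, pvScoreA keywords b)) books []
    simpa using h
  rw [hsc]
  -- the stable reverse sort is the bucket concatenation
  rw [pvSorted_buckets keywords.length _ (by
    intro x hx
    obtain ⟨b, hb, rfl⟩ := List.mem_map.mp hx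
    have := (List.mem_filter.mp hb).2
    simp only [decide_eq_true_eq, gt_iff_lt] at this
    exact ⟨by omega, pvScoreA_le keywords b⟩)]
  -- B's final loop is the same concatenation
  rw [pvPyRange_desc keywords.length]
  rw [PySem.List.foldl_append_eq_flatMap]
  rw [List.nil_append, List.map_flatMap]
  apply List.flatMap_congr
  intro s hs
  have hs1 := (pvMem_desc hs).1
  rw [pvBuckets_getD (pvScoreB (keywords.map PySem.Str.lower)) books s hs1]
  rw [List.filter_map]
  have hcomp : (fun x : (List (String × String)) × Int => x.1) ∘ (fun b => (b, pvScoreA keywords b)) = id := rfl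
  rw [List.map_map, hcomp, List.map_id, List.filter_filter]
  apply List.filter_congr
  intro b hb
  simp only [Function.comp_apply]
  rw [pvScore_eq keywords b]
  by_cases h : pvScoreA keywords b = s
  · simp [h]
    omega
  · have : (pvScoreA keywords b == s) = false := by simp [h]
    simp [this]

-- ===== VERDICT (by name: the statement is the Claim_ definition above) =====
theorem filter_books_spec : Claim_equal_filter_books := by
  intro books keywords _ _
  unfold Spec_filter_books
  exact filter_books_eq books keywords
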